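-- pv_equiv track=rewrite | github.com/drissiya/MTTLADE | data_utils/n2c2/tagging.py | tag_mention
-- ===== SOURCE A (Python) =====
-- def tag_mention(tok_text, tok_entity, begin, labelset, labels, entity_start, relation_type, segment):
--     if segment == "BIO":
--         for i, (word, start) in enumerate(zip(tok_text, entity_start)):
--             if start == begin:
--                 if len(tok_entity) == 1:
--                     labels[i] = labelset['b'] + relation_type
--                 else:
--                     labels[i] = labelset['b'] + relation_type
--                     labels[i+1:i+len(tok_entity)-1] = [labelset['i'] + relation_type] * (len(tok_entity)-2)
--                     labels[i+len(tok_entity)-1] = labelset['i'] + relation_type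
--     elif segment == "BILOU":
--         for i, (word, start) in enumerate(zip(tok_text, entity_start)):
--             if start == begin:
--                 if len(tok_entity) == 1:
--                     labels[i] = labelset['u'] + relation_type
--                 else:
--                     labels[i] = labelset['b'] + relation_type
--                     labels[i+1:i+len(tok_entity)-1] = [labelset['i'] + relation_type] * (len(tok_entity)-2)
--                     labels[i+len(tok_entity)-1] = labelset['l'] + relation_type
--     return labels
-- ===== SOURCE B (Python) =====
-- def tag_mention(tok_text, tok_entity, begin, labelset, labels, entity_start, relation_type, segment):
--     # Single left-to-right sweep over label positions with an "active span start" state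
--     # machine, instead of per-match span writes.  Equivalence is about the RETURN value
--     # (both A and B update `labels` in place to the same final content).
--     if segment != "BIO" and segment != "BILOU":
--         return labels
--     n = len(tok_entity)
--     if n == 0:
--         return labels
--     bilou = segment == "BILOU"
--     m = min(len(tok_text), len(entity_start))
--     out = []
--     active = None
--     for j, old in enumerate(labels):
--         if j < m and entity_start[j] == begin:
--             active = j
--         if active is not None and j - active < n:
--             if n == 1:
--                 out.append(labelset['u' if bilou else 'b'] + relation_type)
--             elif j == active:
--                 out.append(labelset['b'] + relation_type)
--             elif j - active == n - 1:
--                 out.append(labelset['l' if bilou else 'i'] + relation_type)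
--             else:
--                 out.append(labelset['i'] + relation_type)
--         else:
--             out.append(old)
--     labels[:] = out
--     return labels
-- ===== Notes on version B (the rewrite author's own statement) =====
-- stated objective: alternative
-- what changed: B replaces A's per-match span writes (begin index assignment, interior slice assignment, final index assignment for every matching position) by a single left-to-right sweep over the label positions with an 'active span start' state machine that decides each output tag from the distance to the most recent match, building the output list in one streaming pass.
import Mathlib
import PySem

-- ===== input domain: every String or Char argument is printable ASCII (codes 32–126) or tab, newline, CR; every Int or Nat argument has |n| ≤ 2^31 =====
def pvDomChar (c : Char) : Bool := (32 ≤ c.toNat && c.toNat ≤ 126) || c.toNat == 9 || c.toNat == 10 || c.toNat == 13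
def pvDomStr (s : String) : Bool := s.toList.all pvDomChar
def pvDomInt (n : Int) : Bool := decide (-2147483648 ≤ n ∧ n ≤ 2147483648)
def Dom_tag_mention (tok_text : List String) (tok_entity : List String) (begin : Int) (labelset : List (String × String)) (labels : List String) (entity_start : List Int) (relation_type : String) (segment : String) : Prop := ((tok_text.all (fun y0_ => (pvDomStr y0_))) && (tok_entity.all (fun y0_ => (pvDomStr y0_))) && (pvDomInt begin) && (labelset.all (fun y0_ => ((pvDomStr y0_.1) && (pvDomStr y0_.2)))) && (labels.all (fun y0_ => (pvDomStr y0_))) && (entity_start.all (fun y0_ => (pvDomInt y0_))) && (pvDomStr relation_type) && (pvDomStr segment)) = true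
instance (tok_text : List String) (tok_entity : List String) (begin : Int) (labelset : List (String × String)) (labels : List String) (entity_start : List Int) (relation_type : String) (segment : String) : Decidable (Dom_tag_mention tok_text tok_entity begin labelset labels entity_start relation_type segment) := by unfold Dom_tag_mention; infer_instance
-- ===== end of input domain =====

-- B replaces A's per-match span writes by ONE left-to-right sweep over the label positions with an
-- "active span start" state machine; equivalence is about the RETURN value (both Pythons update
-- `labels` in place to the same final content on the inputs Pre_ admits).

-- dict lookup with default: d[k] on the association list (first match), total form used only under Pre_
def pyDictGetD (d : List (String × String)) (k dflt : String) : String :=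
  ((d.find? (fun q => q.1 == k)).map Prod.snd).getD dflt

-- Python step-1 slice assignment  xs[a:b] = ys  (hand-ported, exact: bounds wrap from the end when
-- negative and clamp to [0, len]; stop is clamped below by start).  Used by port A.
def pySliceAssign (xs : List String) (a b : Int) (ys : List String) : List String :=
  let a' := PySem.List.clampIdx xs.length a
  let b' := max a' (PySem.List.clampIdx xs.length b)
  xs.take a' ++ ys ++ xs.drop b'

-- ===== PORT A =====
def tag_mention (tok_text : List String) (tok_entity : List String) (begin : Int) (labelset : List (String × String)) (labels : List String) (entity_start : List Int) (relation_type : String) (segment : String) : List String :=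
  if segment == "BIO" then
    (PySem.List.enumerate (tok_text.zip entity_start) 0).foldl (fun labels p =>
      if p.2.2 == begin then
        if tok_entity.length == 1 then
          PySem.List.pySetD labels p.1 (pyDictGetD labelset "b" "" ++ relation_type)
        else
          let l1 := PySem.List.pySetD labels p.1 (pyDictGetD labelset "b" "" ++ relation_type)
          let l2 := pySliceAssign l1 (p.1 + 1) (p.1 + (tok_entity.length : Int) - 1)
              (List.replicate (tok_entity.length - 2) (pyDictGetD labelset "i" "" ++ relation_type))
          PySem.List.pySetD l2 (p.1 + (tok_entity.length : Int) - 1)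
              (pyDictGetD labelset "i" "" ++ relation_type)
      else labels) labels
  else if segment == "BILOU" then
    (PySem.List.enumerate (tok_text.zip entity_start) 0).foldl (fun labels p =>
      if p.2.2 == begin then
        if tok_entity.length == 1 then
          PySem.List.pySetD labels p.1 (pyDictGetD labelset "u" "" ++ relation_type)
        else
          let l1 := PySem.List.pySetD labels p.1 (pyDictGetD labelset "b" "" ++ relation_type)
          let l2 := pySliceAssign l1 (p.1 + 1) (p.1 + (tok_entity.length : Int) - 1)
              (List.replicate (tok_entity.length - 2) (pyDictGetD labelset "i" "" ++ relation_type))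
          PySem.List.pySetD l2 (p.1 + (tok_entity.length : Int) - 1)
              (pyDictGetD labelset "l" "" ++ relation_type)
      else labels) labels
  else labels

-- ===== PORT B =====
-- the body of Source B's single for-loop, as a step function over the state (out, active)
def sweepStep (n : Nat) (condB : Int → Bool) (tagOf : Int → Int → String)
    (st : List String × Option Int) (p : Int × String) : List String × Option Int :=
  let active := if condB p.1 then some p.1 else st.2
  let v := match active with
    | some i => if p.1 - i < (n : Int) then tagOf p.1 i else p.2
    | none => p.2
  (st.1 ++ [v], active)

def tag_mention_alt (tok_text : List String) (tok_entity : List String) (begin : Int) (labelset : List (String × String)) (labels : List String) (entity_start : List Int) (relation_type : String) (segment : String) : List String :=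
  if !(segment == "BIO" || segment == "BILOU") then labels
  else if tok_entity.length == 0 then labels
  else
    ((PySem.List.enumerate labels 0).foldl
      (sweepStep tok_entity.length
        (fun j => decide (j < ((min tok_text.length entity_start.length : Nat) : Int)) &&
                  (PySem.List.pyGetD entity_start j 0 == begin))
        (fun j i =>
          if tok_entity.length == 1 then
            pyDictGetD labelset (if segment == "BILOU" then "u" else "b") "" ++ relation_type
          else if j == i then pyDictGetD labelset "b" "" ++ relation_type
          else if j - i == (tok_entity.length : Int) - 1 then
            pyDictGetD labelset (if segment == "BILOU" then "l" else "i") "" ++ relation_type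
          else pyDictGetD labelset "i" "" ++ relation_type))
      (([] : List String), (none : Option Int))).1

-- ===== PRECONDITION & SPEC =====
-- Pre_ excludes the inputs where Python A raises — a KeyError (a needed labelset key missing while there is
-- a matching position) or an IndexError (a write position out of range of `labels`) — and additionally the
-- inputs with an EMPTY tok_entity at a matching start position: there A still returns, but its slice
-- arithmetic writes a begin tag at the match and an inside tag one position BEFORE it (wrapping to the last
-- element, and deleting interior elements, when the match is at index 0), an accident of its implementation
-- no caller would specify; B naturally leaves `labels` unchanged there.
def Pre_tag_mention (tok_text : List String) (tok_entity : List String) (begin : Int) (labelset : List (String × String)) (labels : List String) (entity_start : List Int) (relation_type : String) (segment : String) : Prop :=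
  (if segment == "BIO" || segment == "BILOU" then
    let M := ((PySem.List.enumerate (entity_start.take tok_text.length) 0).filter (fun p => p.2 == begin)).map Prod.fst
    if M.isEmpty then true
    else
      let n := tok_entity.length
      let L := (labels.length : Int)
      let has := fun (k : String) => labelset.any (fun q => q.1 == k)
      if n == 0 then false
      else
        (if n == 1 then has (if segment == "BILOU" then "u" else "b")
         else has "b" && has "i" && (!(segment == "BILOU") || has "l")) &&
        M.all (fun i => decide (i + (n : Int) ≤ L))
  else true) = true
instance (tok_text : List String) (tok_entity : List String) (begin : Int) (labelset : List (String × String)) (labels : List String) (entity_start : List Int) (relation_type : String) (segment : String) : Decidable (Pre_tag_mention tok_text tok_entity begin labelset labels entity_start relation_type segment) := by unfold Pre_tag_mention; infer_instance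

def pvWitness_tag_mention : List String × List String × Int × (List (String × String)) × List String × List Int × String × String :=
  (["a", "b"], ["x", "y"], 0, [("b", "B-"), ("i", "I-")], ["O", "O"], [0, 5], "T", "BIO")

def Spec_tag_mention (tok_text : List String) (tok_entity : List String) (begin : Int) (labelset : List (String × String)) (labels : List String) (entity_start : List Int) (relation_type : String) (segment : String) (out : List String) : Prop := out = tag_mention_alt tok_text tok_entity begin labelset labels entity_start relation_type segment
instance (tok_text : List String) (tok_entity : List String) (begin : Int) (labelset : List (String × String)) (labels : List String) (entity_start : List Int) (relation_type : String) (segment : String) (out : List String) : Decidable (Spec_tag_mention tok_text tok_entity begin labelset labels entity_start relation_type segment out) := by unfold Spec_tag_mention; infer_instance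

-- ===== CLAIM (what is proved, stated in full; the proofs are below) =====
def Claim_equal_tag_mention : Prop := ∀ (tok_text : List String) (tok_entity : List String) (begin : Int) (labelset : List (String × String)) (labels : List String) (entity_start : List Int) (relation_type : String) (segment : String), Dom_tag_mention tok_text tok_entity begin labelset labels entity_start relation_type segment → Pre_tag_mention tok_text tok_entity begin labelset labels entity_start relation_type segment → Spec_tag_mention tok_text tok_entity begin labelset labels entity_start relation_type segment (tag_mention tok_text tok_entity begin labelset labels entity_start relation_type segment)

-- ===== LEMMAS AND PROOFS =====

-- (lemmas about A's slice-fold form, carried over)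
theorem filt_enum_zip (tt : List String) (es : List Int) (b : Int) (s : Int) :
  ((PySem.List.enumerate (tt.zip es) s).filter (fun p => p.2.2 == b)).map Prod.fst
  = ((PySem.List.enumerate (es.take tt.length) s).filter (fun p => p.2 == b)).map Prod.fst := by
  induction tt generalizing es s with
  | nil => simp [PySem.List.enumerate_nil]
  | cons t tt ih =>
    cases es with
    | nil => simp [PySem.List.enumerate_nil]
    | cons e es =>
      simp only [List.zip_cons_cons, List.length_cons, List.take_succ_cons,
        PySem.List.enumerate_cons, List.filter_cons]
      by_cases he : (e == b) = true
      · simp [he, ih]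
      · simp [he, ih]

theorem mem_filt_nonneg (es' : List Int) (b i : Int)
    (h : i ∈ ((PySem.List.enumerate es' 0).filter (fun p => p.2 == b)).map Prod.fst) : 0 ≤ i := by
  simp only [List.mem_map, List.mem_filter] at h
  obtain ⟨p, ⟨hp, _⟩, rfl⟩ := h
  obtain ⟨k, hk, rfl⟩ := (PySem.List.mem_enumerate_iff _ _ _).mp hp
  simp

theorem sliceAssign_natCast (L ys : List String) (k m : Nat) (hm : k ≤ m) (hmL : m ≤ L.length) :
  pySliceAssign L (k:Int) (m:Int) ys = L.take k ++ ys ++ L.drop m := by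
  simp only [pySliceAssign, PySem.List.clampIdx_natCast]
  rw [Nat.min_eq_left (by omega), Nat.min_eq_left (by omega), Nat.max_eq_right (by omega)]

theorem step1_eq (L : List String) (k : Nat) (v : String) (h : k + 1 ≤ L.length) :
  PySem.List.pySetD L (k:Int) v = pySliceAssign L (k:Int) ((k:Int)+(1:Nat)) [v] := by
  have hc : (k:Int) + ((1:Nat):Int) = ((k+1 : Nat) : Int) := by push_cast; ring
  rw [hc, sliceAssign_natCast L [v] k (k+1) (by omega) h]
  simp [PySem.List.pySetD_natCast, List.set_eq_take_cons_drop v (by omega : k < L.length)]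

theorem step2_eq (L : List String) (k n : Nat) (hn : 2 ≤ n) (h : k + n ≤ L.length) (vb vi vl : String) :
  PySem.List.pySetD (pySliceAssign (PySem.List.pySetD L (k:Int) vb) ((k:Int)+1) ((k:Int)+(n:Int)-1) (List.replicate (n-2) vi)) ((k:Int)+(n:Int)-1) vl
  = pySliceAssign L (k:Int) ((k:Int)+(n:Int)) ([vb] ++ List.replicate (n-2) vi ++ [vl]) := by
  have hc1 : (k:Int) + 1 = ((k+1 : Nat) : Int) := by push_cast; ring
  have hc2 : (k:Int) + (n:Int) - 1 = ((k+n-1 : Nat) : Int) := by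
    push_cast [Nat.cast_sub (by omega : 1 ≤ k+n)]; ring
  have hc3 : (k:Int) + (n:Int) = ((k+n : Nat) : Int) := by push_cast; ring
  rw [hc1, hc2, hc3, sliceAssign_natCast L _ k (k+n) (by omega) h]
  rw [show PySem.List.pySetD L (k:Int) vb = L.set k vb from by simp [PySem.List.pySetD_natCast]]
  rw [sliceAssign_natCast _ _ (k+1) (k+n-1) (by omega) (by simp; omega)]
  rw [List.set_eq_take_cons_drop vb (by omega : k < L.length)]
  have hpre : (L.take k ++ vb :: L.drop (k+1)) = (L.take k ++ [vb]) ++ L.drop (k+1) := by simp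
  have hlen : (L.take k ++ [vb]).length = k + 1 := by simp; omega
  have hsplit : List.drop (k+n-1) ((L.take k ++ [vb]) ++ L.drop (k+1)) = L.drop (k+n-1) := by
    rw [List.drop_append, List.drop_eq_nil_of_le (by rw [hlen]; omega),
      hlen, List.nil_append, List.drop_drop, show k+1+(k+n-1-(k+1)) = k+n-1 from by omega]
  rw [hpre, List.take_left' hlen, hsplit]
  rw [show ∀ xs : List String, PySem.List.pySetD xs ((k+n-1:Nat):Int) vl = xs.set (k+n-1) vl from fun xs => by simp [PySem.List.pySetD_natCast]]
  have hassoc : (L.take k ++ [vb]) ++ List.replicate (n-2) vi ++ L.drop (k+n-1)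
      = ((L.take k ++ [vb]) ++ List.replicate (n-2) vi) ++ L.drop (k+n-1) := by simp
  have hlen2 : ((L.take k ++ [vb]) ++ List.replicate (n-2) vi).length = k+n-1 := by simp; omega
  rw [hassoc, List.set_append_right _ _ (le_of_eq hlen2), hlen2]
  rw [Nat.sub_self, List.drop_eq_getElem_cons (show k+n-1 < L.length by omega), List.set_cons_zero,
    show k+n-1+1 = k+n from by omega]
  simp [List.append_assoc]

theorem sliceAssign_length (L span : List String) (k n : Nat) (hspan : span.length = n)
    (h : k + n ≤ L.length) :
    (pySliceAssign L (k:Int) ((k:Int)+(n:Int)) span).length = L.length := by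
  rw [show (k:Int)+(n:Int) = ((k+n:Nat):Int) from by push_cast; ring,
    sliceAssign_natCast L span k (k+n) (by omega) h]
  simp [hspan]; omega

theorem fold_eq (n : Nat) (hn : 1 ≤ n) (vu vb vi vl : String) (M : List Int) (L : List String)
    (hM : ∀ i ∈ M, 0 ≤ i ∧ i + (n:Int) ≤ (L.length:Int)) :
    M.foldl (fun a i =>
      if n == 1 then PySem.List.pySetD a i vu
      else PySem.List.pySetD (pySliceAssign (PySem.List.pySetD a i vb) (i+1) (i+(n:Int)-1)
              (List.replicate (n-2) vi)) (i+(n:Int)-1) vl) L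
    = M.foldl (fun a i => pySliceAssign a i (i+(n:Int))
        (if n == 1 then [vu] else [vb] ++ List.replicate (n-2) vi ++ [vl])) L := by
  induction M generalizing L with
  | nil => rfl
  | cons i M ih =>
    obtain ⟨h0, hb⟩ := hM i (List.mem_cons_self ..)
    obtain ⟨k, rfl⟩ : ∃ k : Nat, i = (k : Int) := ⟨i.toNat, (Int.toNat_of_nonneg h0).symm⟩
    have hkn : k + n ≤ L.length := by exact_mod_cast hb
    have hstep : (if n == 1 then PySem.List.pySetD L (k:Int) vu
        else PySem.List.pySetD (pySliceAssign (PySem.List.pySetD L (k:Int) vb) ((k:Int)+1) ((k:Int)+(n:Int)-1)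
              (List.replicate (n-2) vi)) ((k:Int)+(n:Int)-1) vl)
        = pySliceAssign L (k:Int) ((k:Int)+(n:Int))
            (if n == 1 then [vu] else [vb] ++ List.replicate (n-2) vi ++ [vl]) := by
      by_cases hn1 : n = 1
      · subst hn1; simp only [beq_self_eq_true, if_true]
        exact step1_eq L k vu (by omega)
      · rw [if_neg (by simpa using hn1), if_neg (by simpa using hn1)]
        exact step2_eq L k n (by omega) hkn vb vi vl
    have hspanlen : (if n == 1 then [vu] else [vb] ++ List.replicate (n-2) vi ++ [vl]).length = n := by
      by_cases hn1 : n = 1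
      · subst hn1; simp
      · rw [if_neg (by simpa using hn1)]; simp; omega
    have hlen : (pySliceAssign L (k:Int) ((k:Int)+(n:Int))
        (if n == 1 then [vu] else [vb] ++ List.replicate (n-2) vi ++ [vl])).length = L.length :=
      sliceAssign_length _ _ k n hspanlen hkn
    simp only [List.foldl_cons, hstep]
    exact ih _ (by intro j hj; rw [hlen]; exact hM j (List.mem_cons_of_mem _ hj))

theorem core_eq (tt : List String) (es : List Int) (b : Int) (labels : List String)
    (n : Nat) (hn : 1 ≤ n) (vu vb vi vl : String)
    (hb : ∀ i ∈ ((PySem.List.enumerate (es.take tt.length) 0).filter (fun p => p.2 == b)).map Prod.fst,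
            i + (n:Int) ≤ (labels.length : Int)) :
    (PySem.List.enumerate (tt.zip es) 0).foldl (fun a p =>
        if p.2.2 == b then
          if n == 1 then PySem.List.pySetD a p.1 vu
          else PySem.List.pySetD (pySliceAssign (PySem.List.pySetD a p.1 vb) (p.1+1) (p.1+(n:Int)-1)
                  (List.replicate (n-2) vi)) (p.1+(n:Int)-1) vl
        else a) labels
    = (((PySem.List.enumerate (es.take tt.length) 0).filter (fun p => p.2 == b)).map Prod.fst).foldl
        (fun a i => pySliceAssign a i (i+(n:Int))
          (if n == 1 then [vu] else [vb] ++ List.replicate (n-2) vi ++ [vl])) labels := by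
  rw [PySem.List.foldl_if_eq_foldl_filter]
  rw [show ((PySem.List.enumerate (tt.zip es) 0).filter (fun p => p.2.2 == b)).foldl (fun a p =>
        if n == 1 then PySem.List.pySetD a p.1 vu
        else PySem.List.pySetD (pySliceAssign (PySem.List.pySetD a p.1 vb) (p.1+1) (p.1+(n:Int)-1)
                (List.replicate (n-2) vi)) (p.1+(n:Int)-1) vl) labels
      = (((PySem.List.enumerate (tt.zip es) 0).filter (fun p => p.2.2 == b)).map Prod.fst).foldl
        (fun a i =>
          if n == 1 then PySem.List.pySetD a i vu
          else PySem.List.pySetD (pySliceAssign (PySem.List.pySetD a i vb) (i+1) (i+(n:Int)-1)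
                (List.replicate (n-2) vi)) (i+(n:Int)-1) vl) labels
      from by rw [List.foldl_map]]
  rw [filt_enum_zip]
  exact fold_eq n hn vu vb vi vl _ labels
    (fun i hi => ⟨mem_filt_nonneg _ _ _ hi, hb i hi⟩)

-- (new machinery: pointwise characterization of both folds)

-- the most recent match position ≤ j (in list order; = max, since the match list is increasing)
def lastLE (M : List Int) (j : Int) : Option Int :=
  M.foldl (fun acc i => if i ≤ j then some i else acc) none

theorem lastLE_append (M : List Int) (i j : Int) :
    lastLE (M ++ [i]) j = if i ≤ j then some i else lastLE M j := by
  simp [lastLE, List.foldl_append]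

theorem lastLE_mem (M : List Int) (j i : Int) (h : lastLE M j = some i) : i ∈ M ∧ i ≤ j := by
  induction M using List.reverseRecOn with
  | nil => simp [lastLE] at h
  | append_singleton M x ih =>
    rw [lastLE_append] at h
    split at h
    · obtain rfl : x = i := by injection h
      exact ⟨by simp, by assumption⟩
    · obtain ⟨h1, h2⟩ := ih h
      exact ⟨by simp [h1], h2⟩

theorem lastLE_self (M : List Int) (j : Int) (hpw : M.Pairwise (· < ·)) (hj : j ∈ M) :
    lastLE M j = some j := by
  induction M using List.reverseRecOn with
  | nil => simp at hj
  | append_singleton M x ih =>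
    rw [List.pairwise_append] at hpw
    rw [lastLE_append]
    rcases List.mem_append.mp hj with hj' | hj'
    · have hlt : j < x := hpw.2.2 j hj' x (by simp)
      rw [if_neg (by omega), ih hpw.1 hj']
    · obtain rfl : j = x := by simpa using hj'
      simp

theorem lastLE_congr_aux (j j' : Int) (M : List Int) (h : ∀ i ∈ M, (i ≤ j) ↔ (i ≤ j')) :
    ∀ acc : Option Int, M.foldl (fun acc i => if i ≤ j then some i else acc) acc
      = M.foldl (fun acc i => if i ≤ j' then some i else acc) acc := by
  induction M with
  | nil => intro acc; rfl
  | cons x M ih =>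
    intro acc
    simp only [List.foldl_cons]
    have hx := h x (List.mem_cons_self ..)
    have hstep : (if x ≤ j then some x else acc) = (if x ≤ j' then some x else acc) := by
      by_cases hxj : x ≤ j
      · rw [if_pos hxj, if_pos (hx.mp hxj)]
      · rw [if_neg hxj, if_neg (fun hc => hxj (hx.mpr hc))]
    rw [hstep]
    exact ih (fun i hi => h i (List.mem_cons_of_mem _ hi)) _

theorem lastLE_congr (M : List Int) (j j' : Int) (h : ∀ i ∈ M, (i ≤ j) ↔ (i ≤ j')) :
    lastLE M j = lastLE M j' :=
  lastLE_congr_aux j j' M h none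

theorem lastLE_none_aux (j : Int) (M : List Int) (h : ∀ i ∈ M, ¬ i ≤ j) :
    ∀ acc : Option Int, M.foldl (fun acc i => if i ≤ j then some i else acc) acc = acc := by
  induction M with
  | nil => intro acc; rfl
  | cons x M ih =>
    intro acc
    simp only [List.foldl_cons, if_neg (h x (List.mem_cons_self ..))]
    exact ih (fun i hi => h i (List.mem_cons_of_mem _ hi)) _

theorem lastLE_none (M : List Int) (j : Int) (h : ∀ i ∈ M, ¬ i ≤ j) : lastLE M j = none :=
  lastLE_none_aux j M h none

-- getElem? of one slice write
theorem sliceAssign_getElem? (a span : List String) (k n j : Nat)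
    (hk : k + n ≤ a.length) (hsp : span.length = n) :
    (pySliceAssign a (k:Int) ((k:Int)+(n:Int)) span)[j]? =
      if k ≤ j ∧ j < k + n then span[j-k]? else a[j]? := by
  rw [show (k:Int)+(n:Int) = ((k+n:Nat):Int) from by push_cast; ring,
    sliceAssign_natCast a span k (k+n) (by omega) hk]
  have htk : (a.take k).length = k := by simp; omega
  rw [List.append_assoc, List.getElem?_append]
  by_cases h1 : j < k
  · rw [if_pos (by rw [htk]; exact h1), List.getElem?_take, if_pos h1, if_neg (by omega)]
  · rw [if_neg (by rw [htk]; omega), htk, List.getElem?_append, hsp]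
    by_cases h2 : j < k + n
    · rw [if_pos (by omega), if_pos (by omega)]
    · rw [if_neg (by omega), if_neg (by omega), List.getElem?_drop,
        show k + n + (j - k - n) = j from by omega]

theorem foldA_length (n : Nat) (span : List String) (hsp : span.length = n)
    (M : List Int) (L : List String)
    (hb : ∀ i ∈ M, 0 ≤ i ∧ i + (n:Int) ≤ (L.length:Int)) :
    (M.foldl (fun a i => pySliceAssign a i (i+(n:Int)) span) L).length = L.length := by
  induction M generalizing L with
  | nil => rfl
  | cons i M ih =>
    obtain ⟨h0, hbd⟩ := hb i (List.mem_cons_self ..)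
    obtain ⟨k, rfl⟩ : ∃ k : Nat, i = (k : Int) := ⟨i.toNat, (Int.toNat_of_nonneg h0).symm⟩
    have hkn : k + n ≤ L.length := by exact_mod_cast hbd
    have hlen := sliceAssign_length L span k n hsp hkn
    simp only [List.foldl_cons]
    rw [ih _ (by intro x hx; rw [hlen]; exact hb x (List.mem_cons_of_mem _ hx)), hlen]

theorem foldA_getElem? (n : Nat) (span : List String) (hsp : span.length = n)
    (M : List Int) (hpw : M.Pairwise (· < ·)) (L : List String)
    (hb : ∀ i ∈ M, 0 ≤ i ∧ i + (n:Int) ≤ (L.length:Int)) (j : Nat) :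
    (M.foldl (fun a i => pySliceAssign a i (i+(n:Int)) span) L)[j]? =
      match lastLE M (j:Int) with
      | some i => if (j:Int) < i + (n:Int) then span[((j:Int) - i).toNat]? else L[j]?
      | none => L[j]? := by
  induction M using List.reverseRecOn with
  | nil => simp [lastLE]
  | append_singleton M x ih =>
    rw [List.pairwise_append] at hpw
    have hball : ∀ i ∈ M, 0 ≤ i ∧ i + (n:Int) ≤ (L.length:Int) :=
      fun i hi => hb i (by simp [hi])
    obtain ⟨h0, hbd⟩ := hb x (by simp)
    obtain ⟨k, rfl⟩ : ∃ k : Nat, x = (k : Int) := ⟨x.toNat, (Int.toNat_of_nonneg h0).symm⟩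
    have hkn : k + n ≤ L.length := by exact_mod_cast hbd
    have hlenM := foldA_length n span hsp M L hball
    rw [List.foldl_append, List.foldl_cons, List.foldl_nil, lastLE_append,
      sliceAssign_getElem? _ span k n j (by omega) hsp]
    by_cases hcov : k ≤ j ∧ j < k + n
    · rw [if_pos hcov, if_pos (by exact_mod_cast Nat.cast_le.mpr hcov.1)]
      show span[j - k]? = if (j:Int) < (k:Int) + (n:Int) then span[((j:Int) - (k:Int)).toNat]? else L[j]?
      rw [if_pos (by omega), show ((j:Int) - (k:Int)).toNat = j - k from by omega]
    · rw [if_neg hcov, ih hpw.1 hball]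
      by_cases hle : (k:Int) ≤ (j:Int)
      · -- j ≥ k + n
        have hjn : k + n ≤ j := by omega
        rw [if_pos hle]
        show _ = if (j:Int) < (k:Int) + (n:Int) then span[((j:Int) - (k:Int)).toNat]? else L[j]?
        rw [if_neg (by omega)]
        cases hL : lastLE M (j:Int) with
        | none => rfl
        | some i' =>
          have hmem := lastLE_mem M _ _ hL
          have hlt : i' < (k:Int) := hpw.2.2 i' hmem.1 (k:Int) (by simp)
          show (if (j:Int) < i' + (n:Int) then span[((j:Int) - i').toNat]? else L[j]?) = L[j]?
          rw [if_neg (by omega)]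
      · rw [if_neg hle]

-- the sweep only appends to the out component
theorem sweep_out_append (n : Nat) (condB : Int → Bool) (tagOf : Int → Int → String) :
    ∀ (l : List (Int × String)) (out : List String) (a : Option Int),
      (l.foldl (sweepStep n condB tagOf) (out, a)).1
        = out ++ (l.foldl (sweepStep n condB tagOf) ([], a)).1 := by
  intro l
  induction l with
  | nil => intro out a; simp
  | cons p l ih =>
    intro out a
    simp only [List.foldl_cons, sweepStep]
    rw [ih]
    conv_rhs => rw [ih]
    simp

theorem sweep_getElem? (n : Nat) (condB : Int → Bool) (tagOf : Int → Int → String)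
    (M : List Int) (hpw : M.Pairwise (· < ·))
    (hcond : ∀ k : Nat, condB (k:Int) = decide ((k:Int) ∈ M)) :
    ∀ (rest : List String) (k : Nat) (active : Option Int),
      active = lastLE M ((k:Int)-1) → ∀ j : Nat,
      (((PySem.List.enumerate rest (k:Int)).foldl (sweepStep n condB tagOf) ([], active)).1)[j]? =
        if j < rest.length then
          (match lastLE M ((k:Int)+(j:Int)) with
           | some i => if (k:Int)+(j:Int) - i < (n:Int) then some (tagOf ((k:Int)+(j:Int)) i) else rest[j]?
           | none => rest[j]?)
        else none := by
  intro rest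
  induction rest with
  | nil =>
    intro k active hact j
    simp [PySem.List.enumerate_nil]
  | cons old rest ih =>
    intro k active hact j
    rw [PySem.List.enumerate_cons, List.foldl_cons]
    have hstep : sweepStep n condB tagOf ([], active) ((k:Int), old)
        = ([match lastLE M (k:Int) with
            | some i => if (k:Int) - i < (n:Int) then tagOf (k:Int) i else old
            | none => old], lastLE M (k:Int)) := by
      have ha' : (if condB (k:Int) then some (k:Int) else active) = lastLE M (k:Int) := by
        rw [hcond k]
        by_cases hk : (k:Int) ∈ M
        · rw [if_pos (by simpa using hk), lastLE_self M _ hpw hk]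
        · rw [if_neg (by simpa using hk), hact]
          exact (lastLE_congr M _ _ (by
            intro i hi
            have : i ≠ (k:Int) := fun hc => hk (hc ▸ hi)
            omega)).symm
      simp only [sweepStep, ha']
      rfl
    rw [hstep, sweep_out_append]
    cases j with
    | zero =>
      simp only [List.singleton_append, List.getElem?_cons_zero, List.length_cons,
        Nat.zero_lt_succ, if_true]
      rw [show (k:Int)+((0:Nat):Int) = (k:Int) from by push_cast; ring]
      cases hL : lastLE M (k:Int) with
      | none => simp
      | some i =>
        by_cases hc : (k:Int) - i < (n:Int)
        · simp [hc]
        · simp [hc]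
    | succ j =>
      simp only [List.singleton_append, List.getElem?_cons_succ]
      have hrec := ih (k+1) (lastLE M (k:Int))
        (by rw [show (((k+1:Nat)):Int)-1 = (k:Int) from by push_cast; ring]) j
      rw [show ((k+1:Nat):Int) = (k:Int)+1 from by push_cast; ring] at hrec
      rw [hrec, show (k:Int)+1+(j:Int) = (k:Int)+((j+1:Nat):Int) from by push_cast; ring]
      simp only [List.length_cons, Nat.add_lt_add_iff_right]

-- the span's element at offset j-i is exactly the tag B picks there
theorem span_tag (n : Nat) (hn : 1 ≤ n) (vu vb vi vl : String) (i : Int) (j : Nat)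
    (_h0 : 0 ≤ i) (hij : i ≤ (j:Int)) (hcov : (j:Int) < i + (n:Int)) :
    (if n == 1 then [vu] else [vb] ++ List.replicate (n-2) vi ++ [vl])[((j:Int) - i).toNat]? =
      some (if n == 1 then vu
            else if (j:Int) == i then vb
            else if (j:Int) - i == (n:Int) - 1 then vl
            else vi) := by
  set d := ((j:Int) - i).toNat with hd
  have hdlt : d < n := by omega
  have hdi : (j:Int) - i = (d:Int) := by omega
  by_cases hn1 : n = 1
  · subst hn1
    simp only [beq_self_eq_true, if_true]
    rw [show d = 0 from by omega]
    rfl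
  · have hne : (n == 1) = false := by simp [hn1]
    rw [hne]
    simp only [Bool.false_eq_true, if_false]
    have hji : ((j:Int) == i) = decide (d = 0) := by
      by_cases h : d = 0
      · simp only [h, decide_true]; simp; omega
      · simp only [h, decide_false]; simp; omega
    have hjn : ((j:Int) - i == (n:Int) - 1) = decide (d = n - 1) := by
      by_cases h : d = n - 1
      · simp only [h, decide_true]; rw [hdi]; simp; omega
      · simp only [h, decide_false]; rw [hdi]; simp
        intro hc; exact h (by omega)
    rw [hji, hjn]
    simp only [decide_eq_true_eq, List.append_assoc, List.getElem?_append, List.getElem?_replicate,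
      List.length_cons, List.length_nil, List.length_replicate, List.getElem?_cons, List.getElem?_nil]
    split_ifs <;> first
      | rfl
      | omega

-- the two folds agree, pointwise, hence as lists
theorem slices_eq_sweep (n : Nat) (hn : 1 ≤ n) (vu vb vi vl : String)
    (condB : Int → Bool) (M : List Int) (hpw : M.Pairwise (· < ·)) (L : List String)
    (hb : ∀ i ∈ M, 0 ≤ i ∧ i + (n:Int) ≤ (L.length:Int))
    (hcond : ∀ k : Nat, condB (k:Int) = decide ((k:Int) ∈ M)) :
    M.foldl (fun a i => pySliceAssign a i (i+(n:Int))
        (if n == 1 then [vu] else [vb] ++ List.replicate (n-2) vi ++ [vl])) L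
    = ((PySem.List.enumerate L 0).foldl
        (sweepStep n condB
          (fun j i => if n == 1 then vu
            else if j == i then vb
            else if j - i == (n:Int) - 1 then vl
            else vi)) ([], none)).1 := by
  have hspanlen : (if n == 1 then [vu] else [vb] ++ List.replicate (n-2) vi ++ [vl]).length = n := by
    by_cases hn1 : n = 1
    · subst hn1; simp
    · rw [if_neg (by simpa using hn1)]; simp; omega
  apply List.ext_getElem?
  intro j
  rw [foldA_getElem? n _ hspanlen M hpw L hb j]
  have hsw := sweep_getElem? n condB
    (fun j i => if n == 1 then vu
      else if j == i then vb
      else if j - i == (n:Int) - 1 then vl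
      else vi) M hpw hcond L 0 none
    (by
      rw [lastLE_none M _ (by intro i hi; have := (hb i hi).1; omega)]) j
  rw [show ((0:Nat):Int) = (0:Int) from rfl] at hsw
  simp only [zero_add] at hsw
  rw [hsw]
  by_cases hj : j < L.length
  · rw [if_pos hj]
    cases hL : lastLE M (j:Int) with
    | none => rfl
    | some i =>
      obtain ⟨hmem, hle⟩ := lastLE_mem M _ _ hL
      have h0 : 0 ≤ i := (hb i hmem).1
      show (if (j:Int) < i + (n:Int)
            then (if n == 1 then [vu] else [vb] ++ List.replicate (n-2) vi ++ [vl])[((j:Int) - i).toNat]?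
            else L[j]?)
        = (if (j:Int) - i < (n:Int)
            then some (if n == 1 then vu
              else if (j:Int) == i then vb
              else if (j:Int) - i == (n:Int) - 1 then vl
              else vi)
            else L[j]?)
      by_cases hc : (j:Int) < i + (n:Int)
      · rw [if_pos hc, if_pos (show (j:Int) - i < (n:Int) from by omega),
          span_tag n hn vu vb vi vl i j h0 hle hc]
      · rw [if_neg hc, if_neg (show ¬ ((j:Int) - i < (n:Int)) from by omega)]
  · rw [if_neg hj]
    cases hL : lastLE M (j:Int) with
    | none => exact List.getElem?_eq_none (by omega)
    | some i =>
      obtain ⟨hmem, hle⟩ := lastLE_mem M _ _ hL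
      have hbd := (hb i hmem).2
      show (if (j:Int) < i + (n:Int)
            then (if n == 1 then [vu] else [vb] ++ List.replicate (n-2) vi ++ [vl])[((j:Int) - i).toNat]?
            else L[j]?) = none
      rw [if_neg (by omega)]
      exact List.getElem?_eq_none (by omega)

-- B's inline match test equals membership in A's match list
theorem condB_eq (tt : List String) (es : List Int) (b : Int) (k : Nat) :
    (decide ((k:Int) < ((min tt.length es.length : Nat) : Int)) &&
      (PySem.List.pyGetD es (k:Int) 0 == b))
    = decide ((k:Int) ∈ (((PySem.List.enumerate (es.take tt.length) 0).filter
        (fun p => p.2 == b)).map Prod.fst)) := by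
  by_cases hk : k < min tt.length es.length
  · have hke : k < es.length := by omega
    have hkt : k < (es.take tt.length).length := by simp; omega
    have hget : PySem.List.pyGetD es (k:Int) 0 = es[k] := by
      rw [PySem.List.pyGetD_natCast, List.getD_eq_getElem?_getD, List.getElem?_eq_getElem hke]
      rfl
    have hgt : (es.take tt.length)[k]'hkt = es[k] := List.getElem_take
    have hmem : ((k:Int) ∈ (((PySem.List.enumerate (es.take tt.length) 0).filter
        (fun p => p.2 == b)).map Prod.fst)) ↔ es[k] = b := by
      simp only [List.mem_map, List.mem_filter]
      constructor
      · rintro ⟨p, ⟨hp, hpb⟩, hfst⟩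
        obtain ⟨t, ht, rfl⟩ := (PySem.List.mem_enumerate_iff _ _ _).mp hp
        simp only [zero_add] at hfst hpb
        have htk : t = k := by exact_mod_cast hfst
        subst htk
        rw [← hgt]
        exact eq_of_beq hpb
      · intro heb
        refine ⟨((k:Int), es[k]), ⟨?_, by simpa using heb⟩, rfl⟩
        exact (PySem.List.mem_enumerate_iff _ _ _).mpr ⟨k, hkt, by simp [hgt]⟩
    have hcast : ((k:Int) < ((min tt.length es.length : Nat) : Int)) := by exact_mod_cast hk
    rw [hget]
    by_cases heb : es[k] = b
    · simp [hmem, heb]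
      omega
    · simp [hmem, heb]
  · have hcast : ¬ ((k:Int) < ((min tt.length es.length : Nat) : Int)) := by push_cast; omega
    have hmem : ¬ ((k:Int) ∈ (((PySem.List.enumerate (es.take tt.length) 0).filter
        (fun p => p.2 == b)).map Prod.fst)) := by
      simp only [List.mem_map, List.mem_filter]
      rintro ⟨p, ⟨hp, _⟩, hfst⟩
      obtain ⟨t, ht, rfl⟩ := (PySem.List.mem_enumerate_iff _ _ _).mp hp
      simp only [zero_add] at hfst
      have htk : t = k := by exact_mod_cast hfst
      subst htk
      simp only [List.length_take] at ht
      omega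
    simp [hmem]
    intro h1 h2
    exact absurd (by omega) hk

theorem M_pairwise (es' : List Int) (b : Int) :
    (((PySem.List.enumerate es' 0).filter (fun p => p.2 == b)).map Prod.fst).Pairwise (· < ·) := by
  apply List.pairwise_map.mpr
  exact List.Pairwise.sublist List.filter_sublist (PySem.List.pairwise_lt_enumerate es' 0)

-- ===== segment-level glue and the verdict =====
theorem tag_mention_seg (tt te : List String) (b : Int) (ls : List (String × String))
    (labels : List String) (es : List Int) (rt seg : String)
    (hpre : Pre_tag_mention tt te b ls labels es rt seg)
    (hseg : seg = "BIO" ∨ seg = "BILOU") :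
    (PySem.List.enumerate (tt.zip es) 0).foldl (fun a p =>
        if p.2.2 == b then
          if te.length == 1 then
            PySem.List.pySetD a p.1 (pyDictGetD ls (if seg == "BILOU" then "u" else "b") "" ++ rt)
          else
            PySem.List.pySetD (pySliceAssign (PySem.List.pySetD a p.1 (pyDictGetD ls "b" "" ++ rt))
                (p.1+1) (p.1+(te.length:Int)-1) (List.replicate (te.length-2) (pyDictGetD ls "i" "" ++ rt)))
              (p.1+(te.length:Int)-1) (pyDictGetD ls (if seg == "BILOU" then "l" else "i") "" ++ rt)
        else a) labels
    = tag_mention_alt tt te b ls labels es rt seg := by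
  have hsegb : (seg == "BIO" || seg == "BILOU") = true := by
    rcases hseg with rfl | rfl <;> rfl
  unfold tag_mention_alt
  rw [hsegb]
  set M := ((PySem.List.enumerate (es.take tt.length) 0).filter (fun p => p.2 == b)).map Prod.fst with hMdef
  have hfilt : (PySem.List.enumerate (tt.zip es) 0).filter (fun p => p.2.2 == b) = [] → True := fun _ => trivial
  by_cases hn0 : te.length = 0
  · -- empty tok_entity: Pre_ forces no match, both sides return labels unchanged
    have hMe : M = [] := by
      by_contra hne
      unfold Pre_tag_mention at hpre
      rw [hsegb, if_pos rfl, ← hMdef] at hpre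
      rw [if_neg (by simpa [List.isEmpty_iff] using hne), if_pos (by simpa using hn0)] at hpre
      exact absurd hpre (by simp)
    have hzfilt : (PySem.List.enumerate (tt.zip es) 0).filter (fun p => p.2.2 == b) = [] := by
      have := filt_enum_zip tt es b 0
      rw [← hMdef] at this
      exact List.map_eq_nil_iff.mp (this ▸ hMe)
    rw [PySem.List.foldl_if_eq_foldl_filter, hzfilt]
    simp [hn0]
  · have hn : 1 ≤ te.length := by omega
    have hb : ∀ i ∈ M, i + (te.length:Int) ≤ (labels.length:Int) := by
      by_cases hMe : M = []
      · intro i hi; rw [hMe] at hi; simp at hi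
      · unfold Pre_tag_mention at hpre
        rw [hsegb, if_pos rfl, ← hMdef] at hpre
        rw [if_neg (by simpa [List.isEmpty_iff] using hMe),
          if_neg (by simpa using hn0), Bool.and_eq_true] at hpre
        have h2 := hpre.2
        simp only [List.all_eq_true, decide_eq_true_eq] at h2
        exact h2
    rw [core_eq tt es b labels te.length hn _ _ _ _ hb]
    have hn0' : (te.length == 0) = false := by
      exact beq_eq_false_iff_ne.mpr hn0
    rw [hn0']
    simp only [Bool.false_eq_true, if_false]
    exact slices_eq_sweep te.length hn
      (pyDictGetD ls (if seg == "BILOU" then "u" else "b") "" ++ rt)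
      (pyDictGetD ls "b" "" ++ rt)
      (pyDictGetD ls "i" "" ++ rt)
      (pyDictGetD ls (if seg == "BILOU" then "l" else "i") "" ++ rt)
      (fun j => decide (j < ((min tt.length es.length : Nat) : Int)) &&
                  (PySem.List.pyGetD es j 0 == b))
      M (M_pairwise _ _) labels
      (fun i hi => ⟨mem_filt_nonneg _ _ _ hi, hb i hi⟩)
      (fun k => condB_eq tt es b k)

theorem tag_mention_spec : Claim_equal_tag_mention := by
  intro tt te b ls labels es rt seg hdom hpre
  unfold Spec_tag_mention
  by_cases hBIO : seg = "BIO"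
  · subst hBIO
    have h := tag_mention_seg tt te b ls labels es rt "BIO" hpre (Or.inl rfl)
    simp only [show (("BIO" : String) == "BILOU") = false from rfl] at h
    simpa [tag_mention] using h
  · by_cases hBILOU : seg = "BILOU"
    · subst hBILOU
      have h := tag_mention_seg tt te b ls labels es rt "BILOU" hpre (Or.inr rfl)
      simp only [show (("BILOU" : String) == "BILOU") = true from rfl] at h
      simpa [tag_mention] using h
    · have h1 : (seg == "BIO") = false := by simpa using hBIO
      have h2 : (seg == "BILOU") = false := by simpa using hBILOU
      simp [tag_mention, tag_mention_alt, h1, h2]
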